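-- pv_equiv track=rewrite | github.com/cccccccccccccc/Myleetcode | MSOTS/Min Steps to Make Piles Equal Height.py | minSteptomakeequal
-- ===== SOURCE A (Python) =====
-- from typing import List
-- from collections import defaultdict
--
-- def minSteptomakeequal(piles:List ):
--     if len(piles) <= 1:
--         return 0
--     pilesdict = defaultdict(int)# value count of the same height
--     for i in piles:
--         pilesdict[i]+=1
--     heightlist = []
--     for k in pilesdict:
--         heightlist.append(k)
--     if len(heightlist) == 1:
--         return 0
--     heightlist.sort()
--     ans = 0
--     for i in range(1,len(heightlist)):
--         ans+= i*pilesdict[heightlist[i]]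
--     return ans
-- ===== SOURCE B (Python) =====
-- def minSteptomakeequal(piles):
--     s = sorted(piles)
--     if len(s) <= 1:
--         return 0
--     ans = 0
--     rank = 0
--     prev = s[0]
--     for x in s[1:]:
--         if x != prev:
--             rank += 1
--             prev = x
--         ans += rank
--     return ans
-- ===== Notes on version B (the rewrite author's own statement) =====
-- stated objective: simpler
-- what changed: Replaces the count-dict plus distinct-key list with a single rank-counting sweep over a sorted copy of the whole list.
import Mathlib
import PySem

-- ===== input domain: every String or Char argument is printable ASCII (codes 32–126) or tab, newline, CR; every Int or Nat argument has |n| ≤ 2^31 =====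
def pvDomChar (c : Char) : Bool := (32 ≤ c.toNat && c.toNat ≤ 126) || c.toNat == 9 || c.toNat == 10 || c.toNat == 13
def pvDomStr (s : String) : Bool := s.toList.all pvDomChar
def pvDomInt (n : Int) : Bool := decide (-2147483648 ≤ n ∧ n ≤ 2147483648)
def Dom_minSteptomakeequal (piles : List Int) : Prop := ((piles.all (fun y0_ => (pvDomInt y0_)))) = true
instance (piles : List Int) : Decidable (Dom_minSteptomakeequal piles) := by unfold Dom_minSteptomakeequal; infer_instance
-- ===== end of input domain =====

-- B replaces A's count-dict + distinct-key list with one rank-counting sweep over a sorted copy (objective: simpler).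


-- ===== PORT A =====
def minSteptomakeequal (piles : List Int) : Int :=
  if piles.length ≤ 1 then 0
  else
    let pilesdict : PySem.Dict Int Int :=
      piles.foldl (fun d i => d.modify i 0 (· + 1)) PySem.Dict.empty
    let heightlist := pilesdict.keys.foldl (fun acc k => acc ++ [k]) ([] : List Int)
    if heightlist.length == 1 then 0
    else
      let hs := PySem.List.sorted heightlist (fun x => x) false
      (PySem.List.pyRange 1 (hs.length : Int) 1).foldl
        (fun ans i => ans + i * pilesdict.getD (PySem.List.pyGetD hs i 0) 0) 0

-- ===== PORT B =====
def minSteptomakeequal_alt (piles : List Int) : Int :=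
  let s := PySem.List.sorted piles (fun x => x) false
  if s.length ≤ 1 then 0
  else
    ((PySem.List.slice s (some 1) none).foldl
      (fun st x =>
        if x ≠ st.2.2 then (st.1 + (st.2.1 + 1), st.2.1 + 1, x)
        else (st.1 + st.2.1, st.2.1, st.2.2))
      ((0 : Int), (0 : Int), PySem.List.pyGetD s 0 0)).1

-- ===== PRECONDITION & SPEC =====
def Spec_minSteptomakeequal (piles : List Int) (out : Int) : Prop := out = minSteptomakeequal_alt piles
instance (piles : List Int) (out : Int) : Decidable (Spec_minSteptomakeequal piles out) := by unfold Spec_minSteptomakeequal; infer_instance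

-- ===== CLAIM (what is proved, stated in full; the proofs are below) =====
def Claim_equal_minSteptomakeequal : Prop := ∀ (piles : List Int), Dom_minSteptomakeequal piles → Spec_minSteptomakeequal piles (minSteptomakeequal piles)

-- ===== LEMMAS AND PROOFS =====

def gsum (c : Int → Nat) : List Int → Int → Int
  | [], _ => 0
  | h :: t, r => r * (c h : Int) + gsum c t (r + 1)

-- B's loop body
def stepB (st : Int × Int × Int) (x : Int) : Int × Int × Int :=
  if x ≠ st.2.2 then (st.1 + (st.2.1 + 1), st.2.1 + 1, x)
  else (st.1 + st.2.1, st.2.1, st.2.2)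

lemma foldA (c : Int → Nat) : ∀ (m : Nat) (hs : List Int) (k : Nat) (ans : Int), hs.length = k + m →
    (PySem.List.pyRange (k : Int) (hs.length : Int) 1).foldl
      (fun a i => a + i * (c (PySem.List.pyGetD hs i 0) : Int)) ans
    = ans + gsum c (hs.drop k) (k : Int) := by
  intro m
  induction m with
  | zero =>
      intro hs k ans hlen
      have hd : hs.drop k = [] := List.drop_eq_nil_of_le (by omega)
      rw [PySem.List.pyRange_one_eq_nil (by exact_mod_cast Nat.cast_le.mpr (by omega : hs.length ≤ k)), hd]
      simp [gsum]
  | succ m ih =>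
      intro hs k ans hlen
      have hk : k < hs.length := by omega
      rw [PySem.List.pyRange_one_cons (by exact_mod_cast Nat.cast_lt.mpr hk)]
      simp only [List.foldl_cons]
      have hget : PySem.List.pyGetD hs (k : Int) 0 = hs[k] := by
        rw [PySem.List.pyGetD_natCast]
        exact List.getD_eq_getElem hs 0 hk
      have hdrop : hs.drop k = hs[k] :: hs.drop (k + 1) := List.drop_eq_getElem_cons hk
      have : ((k : Int) + 1) = ((k + 1 : Nat) : Int) := by push_cast; ring
      rw [hget, this, ih hs (k + 1) _ (by omega), hdrop]
      simp [gsum]; ring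

lemma foldB_rep_same : ∀ (n : Nat) (ans rank prev : Int),
    (List.replicate n prev).foldl stepB (ans, rank, prev) = (ans + n * rank, rank, prev) := by
  intro n
  induction n with
  | zero => simp
  | succ n ih =>
      intro ans rank prev
      simp only [List.replicate_succ, List.foldl_cons, stepB]
      rw [if_neg (by simp), ih]
      congr 1
      push_cast; ring

lemma foldB_rep_new : ∀ (n : Nat) (ans rank prev h : Int), h ≠ prev →
    (List.replicate (n + 1) h).foldl stepB (ans, rank, prev)
    = (ans + (n + 1) * (rank + 1), rank + 1, h) := by
  intro n ans rank prev h hne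
  simp only [List.replicate_succ, List.foldl_cons, stepB]
  rw [if_pos (by simpa using hne)]
  rw [foldB_rep_same]
  ring_nf

lemma foldB_groups (c : Int → Nat) : ∀ (D : List Int) (prev ans rank : Int),
    (∀ h ∈ D, prev < h) → D.Pairwise (· < ·) → (∀ h ∈ D, 1 ≤ c h) →
    (D.flatMap (fun h => List.replicate (c h) h)).foldl stepB (ans, rank, prev)
    = (ans + gsum c D (rank + 1), rank + D.length, D.getLastD prev) := by
  intro D
  induction D with
  | nil => intro prev ans rank _ _ _; simp [gsum]
  | cons h t ih =>
      intro prev ans rank hgt hpw hc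
      obtain ⟨m, hm⟩ : ∃ m, c h = m + 1 := ⟨c h - 1, by have := hc h (by simp); omega⟩
      simp only [List.flatMap_cons, List.foldl_append]
      rw [hm, foldB_rep_new m ans rank prev h (by have := hgt h (by simp); omega)]
      rw [ih h _ _ (by intro h' hh'; exact (List.pairwise_cons.mp hpw).1 h' hh')
        (List.pairwise_cons.mp hpw).2 (by intro h' hh'; exact hc h' (by simp [hh']))]
      rw [List.getLastD_cons]
      simp only [gsum, List.length_cons, Prod.mk.injEq, hm]
      refine ⟨by push_cast; ring, by omega, trivial⟩

lemma count_flatMap_rep (c : Int → Nat) : ∀ (D : List Int), D.Nodup → ∀ v : Int,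
    (D.flatMap (fun h => List.replicate (c h) h)).count v = if v ∈ D then c v else 0 := by
  intro D
  induction D with
  | nil => simp
  | cons h t ih =>
      intro hnd v
      simp only [List.flatMap_cons, List.count_append, List.count_replicate]
      rw [ih (List.nodup_cons.mp hnd).2 v]
      by_cases hv : v = h
      · subst hv
        simp [(List.nodup_cons.mp hnd).1]
      · simp [hv, Ne.symm hv]

lemma pairwise_le_flatMap (c : Int → Nat) : ∀ (D : List Int), D.Pairwise (· < ·) →
    (D.flatMap (fun h => List.replicate (c h) h)).Pairwise (· ≤ ·) := by
  intro D
  induction D with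
  | nil => simp
  | cons h t ih =>
      intro hpw
      simp only [List.flatMap_cons]
      rw [List.pairwise_append]
      refine ⟨List.pairwise_replicate.mpr (by simp), ih (List.pairwise_cons.mp hpw).2, ?_⟩
      intro a ha b hb
      have ha' : a = h := (List.eq_of_mem_replicate ha)
      obtain ⟨h', hh', hb'⟩ := List.mem_flatMap.mp hb
      have hb'' : b = h' := List.eq_of_mem_replicate hb'
      rw [ha', hb'']
      exact le_of_lt ((List.pairwise_cons.mp hpw).1 h' hh')

lemma D_pairwise_lt (piles : List Int) :
    (PySem.List.sorted (PySem.List.dedup piles) (fun x => x) false).Pairwise (· < ·) := by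
  have hle := PySem.List.sorted_pairwise (PySem.List.dedup piles) (fun x => x)
  have hnd : (PySem.List.sorted (PySem.List.dedup piles) (fun x => x) false).Nodup :=
    ((PySem.List.sorted_perm (PySem.List.dedup piles) (fun x => x) false).symm).nodup
      (PySem.List.nodup_dedup piles)
  exact (hle.and hnd).imp (fun hab => lt_of_le_of_ne hab.1 hab.2)

lemma sorted_eq_flat (piles : List Int) :
    PySem.List.sorted piles (fun x => x) false
    = (PySem.List.sorted (PySem.List.dedup piles) (fun x => x) false).flatMap
        (fun h => List.replicate (piles.count h) h) := by
  set D := PySem.List.sorted (PySem.List.dedup piles) (fun x => x) false with hD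
  have hndD : D.Nodup :=
    ((PySem.List.sorted_perm (PySem.List.dedup piles) (fun x => x) false).symm).nodup
      (PySem.List.nodup_dedup piles)
  have hmemD : ∀ v, v ∈ D ↔ v ∈ piles := by
    intro v
    rw [hD, PySem.List.mem_sorted, PySem.List.mem_dedup]
  apply PySem.List.sorted_id_eq_of_perm_of_pairwise
  · apply List.perm_iff_count.mpr
    intro v
    rw [count_flatMap_rep _ D hndD v]
    by_cases hv : v ∈ D
    · simp [hv]
    · simp [hv]
      have : v ∉ piles := fun hc => hv ((hmemD v).mpr hc)
      exact (List.count_eq_zero.mpr this).symm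
  · exact pairwise_le_flatMap _ D (D_pairwise_lt piles)

lemma alt_eval (piles : List Int) (hne : piles ≠ []) :
    minSteptomakeequal_alt piles = gsum (fun v => piles.count v)
      ((PySem.List.sorted (PySem.List.dedup piles) (fun x => x) false).drop 1) 1 := by
  set D := PySem.List.sorted (PySem.List.dedup piles) (fun x => x) false with hD
  have hmemD : ∀ v, v ∈ D ↔ v ∈ piles := by
    intro v; rw [hD, PySem.List.mem_sorted, PySem.List.mem_dedup]
  have hDne : D ≠ [] := by
    intro h
    obtain ⟨x, hx⟩ := List.exists_mem_of_ne_nil piles hne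
    exact absurd ((hmemD x).mpr hx) (by simp [h])
  obtain ⟨h0, t, hDeq⟩ := List.exists_cons_of_ne_nil hDne
  have hpw := D_pairwise_lt piles
  rw [← hD] at hpw
  have hcpos : ∀ h ∈ D, 1 ≤ piles.count h := by
    intro h hh
    have : h ∈ piles := (hmemD h).mp hh
    simpa using List.count_pos_iff.mpr this
  obtain ⟨m, hm⟩ : ∃ m, piles.count h0 = m + 1 :=
    ⟨piles.count h0 - 1, by have := hcpos h0 (by simp [hDeq]); omega⟩
  have hflat : PySem.List.sorted piles (fun x => x) false
      = h0 :: (List.replicate m h0 ++ t.flatMap (fun h => List.replicate (piles.count h) h)) := by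
    rw [sorted_eq_flat piles, ← hD, hDeq, List.flatMap_cons, hm, List.replicate_succ,
      List.cons_append]
  unfold minSteptomakeequal_alt
  by_cases hlen : (PySem.List.sorted piles (fun x => x) false).length ≤ 1
  · rw [if_pos hlen]
    -- piles is a singleton: D has one element, the sum is empty
    rw [PySem.List.length_sorted] at hlen
    obtain ⟨x, hx⟩ : ∃ x, piles = [x] := by
      cases piles with
      | nil => exact absurd rfl hne
      | cons a l => cases l with
        | nil => exact ⟨a, rfl⟩
        | cons b l' => simp at hlen
    have hd1 : (PySem.List.dedup piles).length = 1 := by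
      rw [hx]; rfl
    have hdrop : D.drop 1 = [] := by
      apply List.drop_eq_nil_of_le
      rw [hD, PySem.List.length_sorted, hd1]
    rw [hdrop]
    rfl
  · rw [if_neg hlen]
    simp only [hflat]
    have hget : PySem.List.pyGetD
        (h0 :: (List.replicate m h0 ++ t.flatMap (fun h => List.replicate (piles.count h) h))) 0 0 = h0 := by
      simp [PySem.List.pyGetD]
    rw [hget, PySem.List.slice_from_one]
    simp only [List.tail_cons]
    rw [List.foldl_append]
    have hsame := foldB_rep_same m 0 0 h0
    have hstep : (fun (st : Int × Int × Int) (x : Int) =>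
        if x ≠ st.2.2 then (st.1 + (st.2.1 + 1), st.2.1 + 1, x)
        else (st.1 + st.2.1, st.2.1, st.2.2)) = stepB := by
      funext st x; simp [stepB]
    rw [hstep, hsame]
    simp only [mul_zero, add_zero]
    have hgt : ∀ h ∈ t, h0 < h := by
      intro h hh
      exact (List.pairwise_cons.mp (hDeq ▸ hpw)).1 h hh
    rw [foldB_groups (fun v => piles.count v) t h0 0 0 hgt (List.pairwise_cons.mp (hDeq ▸ hpw)).2
      (fun h hh => hcpos h (by simp [hDeq, hh]))]
    simp [hDeq]

lemma dict_getD (piles : List Int) : ∀ v : Int,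
    (piles.foldl (fun d i => d.modify i 0 (· + 1)) (PySem.Dict.empty : PySem.Dict Int Int)).getD v 0
    = (piles.count v : Int) := by
  intro v
  rw [PySem.Dict.getD_foldl_modify_add_one]
  simp

lemma dict_keys (piles : List Int) :
    (piles.foldl (fun d i => d.modify i 0 (· + 1)) (PySem.Dict.empty : PySem.Dict Int Int)).keys
    = PySem.List.dedup piles := by
  rw [← PySem.Dict.counter_eq_foldl, PySem.Dict.keys_counter]
  simp

lemma port_eval0 (piles : List Int) (h2 : ¬ piles.length ≤ 1)
    (hd : (PySem.List.dedup piles).length = 1) : minSteptomakeequal piles = 0 := by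
  unfold minSteptomakeequal
  rw [if_neg h2]
  simp only [PySem.List.foldl_append_singleton, List.nil_append, dict_keys]
  rw [if_pos (by simpa using hd)]

lemma port_eval (piles : List Int) (h2 : ¬ piles.length ≤ 1)
    (hd : (PySem.List.dedup piles).length ≠ 1) :
    minSteptomakeequal piles = gsum (fun v => piles.count v)
      ((PySem.List.sorted (PySem.List.dedup piles) (fun x => x) false).drop 1) 1 := by
  have hne : piles ≠ [] := by intro h; subst h; simp at h2
  have hdne : (PySem.List.dedup piles).length ≠ 0 := by
    intro h
    obtain ⟨x, hx⟩ := List.exists_mem_of_ne_nil piles hne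
    have hmem : x ∈ PySem.List.dedup piles := (PySem.List.mem_dedup piles x).mpr hx
    rw [List.length_eq_zero_iff] at h
    rw [h] at hmem
    exact absurd hmem (List.not_mem_nil)
  unfold minSteptomakeequal
  rw [if_neg h2]
  simp only [PySem.List.foldl_append_singleton, List.nil_append, dict_keys]
  rw [if_neg (by simpa using hd)]
  have hfun : (fun (ans i : Int) => ans + i *
      (piles.foldl (fun d i => d.modify i 0 (· + 1)) (PySem.Dict.empty : PySem.Dict Int Int)).getD
        (PySem.List.pyGetD (PySem.List.sorted (PySem.List.dedup piles) (fun x => x) false) i 0) 0)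
      = (fun (ans i : Int) => ans + i *
        (((fun v => piles.count v) (PySem.List.pyGetD
          (PySem.List.sorted (PySem.List.dedup piles) (fun x => x) false) i 0) : Nat) : Int)) := by
    funext a i
    rw [dict_getD]
  rw [hfun]
  have hlen : (PySem.List.sorted (PySem.List.dedup piles) (fun x => x) false).length
      = 1 + ((PySem.List.dedup piles).length - 1) := by
    rw [PySem.List.length_sorted]; omega
  have := foldA (fun v => piles.count v) ((PySem.List.dedup piles).length - 1)
    (PySem.List.sorted (PySem.List.dedup piles) (fun x => x) false) 1 0 hlen
  simpa using this

theorem AB_eq : ∀ piles : List Int, minSteptomakeequal piles = minSteptomakeequal_alt piles := by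
  intro piles
  by_cases h1 : piles.length ≤ 1
  · unfold minSteptomakeequal minSteptomakeequal_alt
    rw [if_pos h1, if_pos (by rw [PySem.List.length_sorted]; exact h1)]
  · have hne : piles ≠ [] := by intro h; subst h; simp at h1
    rw [alt_eval piles hne]
    by_cases hd : (PySem.List.dedup piles).length = 1
    · have hdrop : (PySem.List.sorted (PySem.List.dedup piles) (fun x => x) false).drop 1 = [] :=
        List.drop_eq_nil_of_le (by rw [PySem.List.length_sorted, hd])
      rw [hdrop, port_eval0 piles h1 hd]
      rfl
    · exact port_eval piles h1 hd

-- ===== VERDICT (by name: the statement is the Claim_ definition above) =====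
theorem minSteptomakeequal_spec : Claim_equal_minSteptomakeequal := by
  intro piles _
  unfold Spec_minSteptomakeequal
  exact AB_eq piles
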